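-- pv_equiv track=rewrite | github.com/lindongsen/essence-of-AI-engineering | src/topsailai/utils/format_tool.py | parse_topsailai_format
-- ===== SOURCE A (Python) =====
-- from collections import OrderedDict
--
-- TOPSAILAI_FORMAT_PREFIX = "topsailai."
--
-- def parse_topsailai_format(text: str) -> dict:
--     """
--     Parse text in the topsailai format.
--
--     Format:
--     topsailai.{step_name}
--     {raw_text}
--
--     Returns a dictionary where keys are step names and values are raw text content.
--     """
--     lines = text.strip().split('\n')
--     if not lines:
--         return {}
--
--     result = OrderedDict()
--     current_step = None
--     current_content = []
--
--     for line in lines: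
--         # Check if line starts a new step
--         if line.startswith(TOPSAILAI_FORMAT_PREFIX):
--             # Save previous step if exists
--             if current_step:
--                 result[current_step] = '\n'.join(current_content).strip()
--
--             # Start new step
--             step_name = line[len(TOPSAILAI_FORMAT_PREFIX):].strip()
--             current_step = step_name
--             current_content = []
--         elif current_step:
--             # Add to current step's content
--             current_content.append(line)
--
--     # Don't forget the last step
--     if current_step:
--         result[current_step] = '\n'.join(current_content).strip()
--
--     return result
-- ===== SOURCE B (Python) =====
-- import re
-- from collections import OrderedDict
--
-- TOPSAILAI_FORMAT_PREFIX = "topsailai."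
--
-- def parse_topsailai_format(text: str) -> dict:
--     """Chunk-based parse: split once on lines beginning with the prefix,
--     then turn each chunk into a (name, content) entry."""
--     result = OrderedDict()
--     for chunk in re.split(r'(?m)^(?=topsailai\.)', text.strip()):
--         if not chunk.startswith(TOPSAILAI_FORMAT_PREFIX):
--             continue  # preamble before the first header (or empty head chunk)
--         header, _, body = chunk.partition('\n')
--         name = header[len(TOPSAILAI_FORMAT_PREFIX):].strip()
--         if name:
--             result[name] = body.strip()
--     return result
-- ===== Notes on version B (the rewrite author's own statement) =====
-- stated objective: simpler
-- what changed: Replaces A's stateful line-by-line accumulator loop (current_step/current_content carried across iterations) by a stateless two-phase decomposition: one multiline regex split of the stripped text into per-header chunks, then each chunk is mapped independently to a (name, content) entry.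
import Mathlib
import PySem

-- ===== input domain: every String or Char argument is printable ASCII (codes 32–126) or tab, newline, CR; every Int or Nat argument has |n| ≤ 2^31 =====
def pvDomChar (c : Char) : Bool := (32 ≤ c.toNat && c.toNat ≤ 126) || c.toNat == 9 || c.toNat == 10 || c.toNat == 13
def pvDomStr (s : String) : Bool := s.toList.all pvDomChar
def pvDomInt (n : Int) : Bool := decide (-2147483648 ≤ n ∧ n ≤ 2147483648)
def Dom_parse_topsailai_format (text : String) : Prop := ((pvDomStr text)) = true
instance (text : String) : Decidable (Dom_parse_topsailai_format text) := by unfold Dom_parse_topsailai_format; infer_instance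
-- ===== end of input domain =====

-- B replaces A's single stateful line-by-line accumulator loop by a two-phase decomposition
-- (split into per-header chunks once, then map each chunk to an entry); objective: simpler.

def pvPrefix : String := "topsailai."

-- ===== PORT A =====
-- for-loop with state (result dict, current_step, current_content); 'if current_step:'
-- (truthiness of None-or-str) is modelled as cs.getD "" ≠ "".
def pvLoopA (d : PySem.Dict String String) (cs : Option String) (acc : List String) :
    List String → PySem.Dict String String
  | [] =>
      if cs.getD "" ≠ "" then
        d.insert (cs.getD "") (PySem.Str.strip (PySem.Str.join "\n" acc))
      else d
  | l :: ls =>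
      if PySem.Str.startswith l pvPrefix then
        pvLoopA
          (if cs.getD "" ≠ "" then
            d.insert (cs.getD "") (PySem.Str.strip (PySem.Str.join "\n" acc))
          else d)
          (some (PySem.Str.strip (PySem.Str.slice l (some 10)))) [] ls
      else if cs.getD "" ≠ "" then pvLoopA d cs (acc ++ [l]) ls
      else pvLoopA d cs acc ls

def parse_topsailai_format (text : String) : List (String × String) :=
  if (PySem.Str.split? (PySem.Str.strip text) "\n").getD [] = [] then []
  else (pvLoopA PySem.Dict.empty none []
    ((PySem.Str.split? (PySem.Str.strip text) "\n").getD [])).items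

-- ===== PORT B =====
-- chunker: the current chunk is (header line, body lines); a line starting with the
-- prefix closes the chunk and opens a new one (exact port of Source B's re.split on
-- '(?m)^(?=topsailai\.)' applied to the line list, with partition('\n') done per chunk).
def pvChunkGo (h : String) (acc : List String) : List String → List (String × List String)
  | [] => [(h, acc)]
  | l :: ls =>
      if PySem.Str.startswith l pvPrefix then (h, acc) :: pvChunkGo l [] ls
      else pvChunkGo h (acc ++ [l]) ls

-- drop the preamble chunk (lines before the first header)
def pvChunks : List String → List (String × List String)
  | [] => []
  | l :: ls => if PySem.Str.startswith l pvPrefix then pvChunkGo l [] ls else pvChunks ls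

-- one chunk → one entry (skipped when the header's name is empty)
def pvInsB (d : PySem.Dict String String) (hb : String × List String) :
    PySem.Dict String String :=
  let name := PySem.Str.strip (PySem.Str.slice hb.1 (some 10))
  if name ≠ "" then d.insert name (PySem.Str.strip (PySem.Str.join "\n" hb.2)) else d

def parse_topsailai_format_alt (text : String) : List (String × String) :=
  ((pvChunks ((PySem.Str.split? (PySem.Str.strip text) "\n").getD [])).foldl
    pvInsB PySem.Dict.empty).items

-- ===== PRECONDITION & SPEC =====
def Spec_parse_topsailai_format (text : String) (out : List (String × String)) : Prop := out = parse_topsailai_format_alt text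
instance (text : String) (out : List (String × String)) : Decidable (Spec_parse_topsailai_format text out) := by unfold Spec_parse_topsailai_format; infer_instance

-- ===== CLAIM (what is proved, stated in full; the proofs are below) =====
def Claim_equal_parse_topsailai_format : Prop := ∀ (text : String), Dom_parse_topsailai_format text → Spec_parse_topsailai_format text (parse_topsailai_format text)

-- ===== LEMMAS AND PROOFS =====

-- when the chunk's header has an empty name, pvInsB drops the chunk, so its body is irrelevant
lemma pvFold_chunkGo_acc_irrel (ls : List String) (h : String)
    (hn : PySem.Str.strip (PySem.Str.slice h (some 10)) = "") :
    ∀ (acc acc' : List String) (d : PySem.Dict String String),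
      (pvChunkGo h acc ls).foldl pvInsB d = (pvChunkGo h acc' ls).foldl pvInsB d := by
  induction ls generalizing h with
  | nil =>
      intro acc acc' d
      simp [pvChunkGo, pvInsB, hn]
  | cons l ls ih =>
      intro acc acc' d
      by_cases hsw : PySem.Str.startswith l pvPrefix = true
      · have e : ∀ a : List String, pvInsB d (h, a) = d := fun a => by simp [pvInsB, hn]
        simp only [pvChunkGo, if_pos hsw, List.foldl_cons, e]
      · simp only [pvChunkGo, if_neg hsw]
        exact ih h hn (acc ++ [l]) (acc' ++ [l]) d

-- A's loop from a live current step = fold over the pending chunk and the rest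
lemma pvLoopA_eq_fold_chunkGo (ls : List String) :
    ∀ (d : PySem.Dict String String) (h : String) (acc : List String),
      pvLoopA d (some (PySem.Str.strip (PySem.Str.slice h (some 10)))) acc ls
        = (pvChunkGo h acc ls).foldl pvInsB d := by
  induction ls with
  | nil =>
      intro d h acc
      simp [pvLoopA, pvChunkGo, pvInsB]
  | cons l ls ih =>
      intro d h acc
      by_cases hsw : PySem.Str.startswith l pvPrefix = true
      · simp only [pvLoopA, if_pos hsw, pvChunkGo, List.foldl_cons, Option.getD_some]
        rw [ih]
        congr 1
      · simp only [pvLoopA, if_neg hsw, pvChunkGo, Option.getD_some]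
        by_cases hn : PySem.Str.strip (PySem.Str.slice h (some 10)) = ""
        · rw [if_neg (not_not_intro hn)]
          rw [ih d h acc]
          exact pvFold_chunkGo_acc_irrel ls h hn acc (acc ++ [l]) d
        · rw [if_pos hn]
          exact ih d h (acc ++ [l])

-- A's loop with no current step = fold over the chunks after the preamble
lemma pvLoopA_none_eq_fold_chunks (ls : List String) :
    ∀ (d : PySem.Dict String String) (acc : List String),
      pvLoopA d none acc ls = (pvChunks ls).foldl pvInsB d := by
  induction ls with
  | nil =>
      intro d acc
      simp [pvLoopA, pvChunks]
  | cons l ls ih =>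
      intro d acc
      have hfalse : ¬((none : Option String).getD "" ≠ "") := by simp
      by_cases hsw : PySem.Str.startswith l pvPrefix = true
      · simp only [pvLoopA, if_pos hsw, pvChunks, Option.getD_none]
        rw [if_neg (by simp)]
        exact pvLoopA_eq_fold_chunkGo ls d l []
      · simp only [pvLoopA, if_neg hsw, pvChunks, Option.getD_none]
        rw [if_neg (by simp)]
        exact ih d acc

-- ===== VERDICT (by name: the statement is the Claim_ definition above) =====
theorem parse_topsailai_format_spec : Claim_equal_parse_topsailai_format := by
  intro text _
  show parse_topsailai_format text = parse_topsailai_format_alt text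
  unfold parse_topsailai_format parse_topsailai_format_alt
  by_cases hnil : (PySem.Str.split? (PySem.Str.strip text) "\n").getD [] = []
  · rw [if_pos hnil, hnil]
    rfl
  · rw [if_neg hnil, pvLoopA_none_eq_fold_chunks]
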